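-- pv_equiv track=rewrite | github.com/tkwang0530/LeetCode | 1574.py | findLengthOfShortestSubarray2
-- ===== SOURCE A (Python) =====
-- from  typing import List
-- import bisect
--
-- def findLengthOfShortestSubarray2(arr: List[int]) -> int:
--     n = len(arr)
--     left, right = 0, n - 1
--     while left < right and arr[left+1] >= arr[left]:
--         left += 1
--
--     if left == right:
--         return 0
--
--     while right > left and arr[right-1] <= arr[right]:
--         right -= 1
--
--     minRemove = min(n-(left+1), right)
--
--     for i in range(left+1):
--         idx = bisect.bisect_left(arr, x=arr[i], lo=right)
--         minRemove = min(minRemove, idx - (i + 1))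
--     return minRemove
-- ===== SOURCE B (Python) =====
-- def findLengthOfShortestSubarray2(arr):
--     n = len(arr)
--     left = 0
--     while left + 1 < n and arr[left] <= arr[left + 1]:
--         left += 1
--     if left >= n - 1:
--         return 0
--     right = n - 1
--     while right > 0 and arr[right - 1] <= arr[right]:
--         right -= 1
--     ans = min(n - left - 1, right)
--     i, j = 0, right
--     while i <= left and j < n:
--         if arr[i] <= arr[j]:
--             ans = min(ans, j - i - 1)
--             i += 1
--         else:
--             j += 1
--     return ans
-- ===== Notes on version B (the rewrite author's own statement) =====
-- stated objective: alternative
-- what changed: Replaces the per-prefix-element binary search (bisect_left into the sorted suffix) with a single two-pointer merge over the non-decreasing prefix and suffix; the post-scan phase becomes one linear pass (asymptotically O(n) vs O(n log n), though not measurably faster in CPython where bisect is C-coded).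
import Mathlib
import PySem

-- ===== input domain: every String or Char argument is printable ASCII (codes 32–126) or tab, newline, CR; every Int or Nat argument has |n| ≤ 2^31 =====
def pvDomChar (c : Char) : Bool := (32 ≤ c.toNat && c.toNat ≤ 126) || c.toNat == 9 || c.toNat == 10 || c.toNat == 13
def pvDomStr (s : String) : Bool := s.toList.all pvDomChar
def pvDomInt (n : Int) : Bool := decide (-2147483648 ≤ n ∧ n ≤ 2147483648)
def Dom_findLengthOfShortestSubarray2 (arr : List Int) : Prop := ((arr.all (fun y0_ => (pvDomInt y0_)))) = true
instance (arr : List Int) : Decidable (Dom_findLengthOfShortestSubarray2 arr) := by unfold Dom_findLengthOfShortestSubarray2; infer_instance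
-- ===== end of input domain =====

-- B replaces A's per-prefix-element binary search into the sorted suffix by a single
-- two-pointer merge over the non-decreasing prefix and suffix (objective: alternative, one linear pass).

-- ===== PORT A =====
-- indexing helper: exact for in-range non-negative indices, which is every access
-- either port performs on inputs satisfying Pre_ (arr ≠ [])
def pvGet (arr : List Int) (i : Nat) : Int := arr.getD i 0

-- while left < right and arr[left+1] >= arr[left]: left += 1
def aLeftLoop (arr : List Int) (left right : Nat) : Nat :=
  if _h : left < right ∧ pvGet arr left ≤ pvGet arr (left + 1) then
    aLeftLoop arr (left + 1) right
  else left
termination_by right - left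
decreasing_by omega

-- while right > left and arr[right-1] <= arr[right]: right -= 1
def aRightLoop (arr : List Int) (left right : Nat) : Nat :=
  if _h : left < right ∧ pvGet arr (right - 1) ≤ pvGet arr right then
    aRightLoop arr left (right - 1)
  else right
termination_by right - left
decreasing_by omega

-- bisect.bisect_left(arr, x, lo, hi): the standard-library binary search, transliterated
def bisectLeftLoop (arr : List Int) (x : Int) (lo hi : Nat) : Nat :=
  if _h : lo < hi then
    let mid := (lo + hi) / 2
    if pvGet arr mid < x then bisectLeftLoop arr x (mid + 1) hi
    else bisectLeftLoop arr x lo mid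
  else lo
termination_by hi - lo
decreasing_by all_goals omega

def findLengthOfShortestSubarray2 (arr : List Int) : Int :=
  let n := arr.length
  let left := aLeftLoop arr 0 (n - 1)
  if left = n - 1 then 0  -- 'left == right' with right = n-1 (n ≥ 1 under Pre_)
  else
    let right := aRightLoop arr left (n - 1)
    let minRemove := min ((n : Int) - ((left : Int) + 1)) (right : Int)
    (List.range (left + 1)).foldl
      (fun acc i =>
        min acc ((bisectLeftLoop arr (pvGet arr i) right n : Int) - ((i : Int) + 1)))
      minRemove

-- ===== PORT B =====
-- while left + 1 < n and arr[left] <= arr[left+1]: left += 1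
def bLeftLoop (arr : List Int) (n left : Nat) : Nat :=
  if _h : left + 1 < n ∧ pvGet arr left ≤ pvGet arr (left + 1) then
    bLeftLoop arr n (left + 1)
  else left
termination_by n - left
decreasing_by omega

-- while right > 0 and arr[right-1] <= arr[right]: right -= 1
def bRightLoop (arr : List Int) (right : Nat) : Nat :=
  if _h : 0 < right ∧ pvGet arr (right - 1) ≤ pvGet arr right then
    bRightLoop arr (right - 1)
  else right
termination_by right
decreasing_by omega

-- while i <= left and j < n: merge
def bMerge (arr : List Int) (n left i j : Nat) (ans : Int) : Int :=
  if _h : i ≤ left ∧ j < n then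
    if pvGet arr i ≤ pvGet arr j then
      bMerge arr n left (i + 1) j (min ans ((j : Int) - (i : Int) - 1))
    else
      bMerge arr n left i (j + 1) ans
  else ans
termination_by (left + 1 - i) + (n - j)
decreasing_by all_goals omega

def findLengthOfShortestSubarray2_alt (arr : List Int) : Int :=
  let n := arr.length
  let left := bLeftLoop arr n 0
  if left + 1 ≥ n then 0  -- 'left >= n - 1'
  else
    let right := bRightLoop arr (n - 1)
    let ans := min ((n : Int) - (left : Int) - 1) (right : Int)
    bMerge arr n left 0 right ans

-- ===== PRECONDITION & SPEC =====
-- Pre_ excludes only the empty list, on which A raises IndexError (arr[0] inside the bisect call).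
def Pre_findLengthOfShortestSubarray2 (arr : List Int) : Prop := arr ≠ []
instance (arr : List Int) : Decidable (Pre_findLengthOfShortestSubarray2 arr) := by
  unfold Pre_findLengthOfShortestSubarray2; infer_instance

def pvWitness_findLengthOfShortestSubarray2 : List Int := [1, 3, 2, 4]

def Spec_findLengthOfShortestSubarray2 (arr : List Int) (out : Int) : Prop :=
  out = findLengthOfShortestSubarray2_alt arr
instance (arr : List Int) (out : Int) : Decidable (Spec_findLengthOfShortestSubarray2 arr out) := by
  unfold Spec_findLengthOfShortestSubarray2; infer_instance

-- ===== CLAIM (what is proved, stated in full; the proofs are below) =====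
def Claim_equal_findLengthOfShortestSubarray2 : Prop :=
  ∀ (arr : List Int), Dom_findLengthOfShortestSubarray2 arr →
    Pre_findLengthOfShortestSubarray2 arr →
    Spec_findLengthOfShortestSubarray2 arr (findLengthOfShortestSubarray2 arr)

-- ===== LEMMAS AND PROOFS =====

-- the first index k, j ≤ k < n, with x ≤ arr[k]; n if there is none (proof-side characterisation)
def firstGE (arr : List Int) (x : Int) (j n : Nat) : Nat :=
  if _h : j < n then (if x ≤ pvGet arr j then j else firstGE arr x (j + 1) n) else n
termination_by n - j
decreasing_by omega

-- the two left scans coincide (their loop conditions are equivalent in Nat arithmetic)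
lemma leftLoop_eq (arr : List Int) (n l : Nat) :
    aLeftLoop arr l (n - 1) = bLeftLoop arr n l := by
  fun_induction bLeftLoop arr n l with
  | case1 l h ih => rw [aLeftLoop, dif_pos (⟨by omega, h.2⟩ : l < n - 1 ∧ pvGet arr l ≤ pvGet arr (l + 1))]; exact ih
  | case2 l h => rw [aLeftLoop, dif_neg (fun hc : l < n - 1 ∧ pvGet arr l ≤ pvGet arr (l + 1) => h ⟨by omega, hc.2⟩)]

-- what the B left scan guarantees
lemma bLeftLoop_spec (arr : List Int) (n l : Nat) :
    l ≤ bLeftLoop arr n l ∧ (l < n → bLeftLoop arr n l < n) ∧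
    (∀ k, l ≤ k → k < bLeftLoop arr n l → pvGet arr k ≤ pvGet arr (k + 1)) ∧
    ¬ (bLeftLoop arr n l + 1 < n ∧ pvGet arr (bLeftLoop arr n l) ≤ pvGet arr (bLeftLoop arr n l + 1)) := by
  fun_induction bLeftLoop arr n l with
  | case1 l h ih =>
      obtain ⟨ih1, ih2, ih3, ih4⟩ := ih
      refine ⟨by omega, fun _ => ih2 (by omega), fun k hk1 hk2 => ?_, ih4⟩
      rcases Nat.eq_or_lt_of_le hk1 with rfl | hlt
      · exact h.2
      · exact ih3 k hlt hk2
  | case2 l h => exact ⟨le_refl l, fun h' => by omega, fun k hk1 hk2 => by omega, h⟩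

-- with the descent at L the two right scans coincide
lemma rightLoop_eq (arr : List Int) (L : Nat)
    (hd : ¬ pvGet arr L ≤ pvGet arr (L + 1)) (r : Nat) :
    L + 1 ≤ r → aRightLoop arr L r = bRightLoop arr r := by
  fun_induction bRightLoop arr r with
  | case1 r h ih =>
      intro hr
      have hne : ¬ r = L + 1 := fun he => hd (by have := h.2; rw [he] at this; simpa using this)
      rw [aRightLoop, dif_pos (⟨by omega, h.2⟩ : L < r ∧ pvGet arr (r - 1) ≤ pvGet arr r)]
      exact ih (by omega)
  | case2 r h =>
      intro hr
      rw [aRightLoop, dif_neg (fun hc : L < r ∧ pvGet arr (r - 1) ≤ pvGet arr r => h ⟨by omega, hc.2⟩)]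

-- what the B right scan guarantees (given the descent at L, it stops at L+1 or above)
lemma bRightLoop_spec (arr : List Int) (L : Nat)
    (hd : ¬ pvGet arr L ≤ pvGet arr (L + 1)) (r : Nat) :
    L + 1 ≤ r →
    L + 1 ≤ bRightLoop arr r ∧ bRightLoop arr r ≤ r ∧
      (∀ k, bRightLoop arr r ≤ k → k < r → pvGet arr k ≤ pvGet arr (k + 1)) := by
  fun_induction bRightLoop arr r with
  | case1 r h ih =>
      intro hr
      have hne : ¬ r = L + 1 := fun he => hd (by have := h.2; rw [he] at this; simpa using this)
      obtain ⟨ih1, ih2, ih3⟩ := ih (by omega)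
      refine ⟨ih1, by omega, fun k hk1 hk2 => ?_⟩
      rcases Nat.lt_or_ge k (r - 1) with hlt | hge
      · exact ih3 k hk1 hlt
      · have : k = r - 1 := by omega
        subst this
        have : r - 1 + 1 = r := by omega
        rw [this]; exact h.2
  | case2 r h => intro hr; exact ⟨hr, le_refl r, fun k hk1 hk2 => by omega⟩

-- stepwise monotone implies monotone on the range
lemma chain_le (f : Nat → Int) (lo hi : Nat)
    (h : ∀ k, lo ≤ k → k < hi → f k ≤ f (k + 1)) :
    ∀ a b, lo ≤ a → a ≤ b → b ≤ hi → f a ≤ f b := by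
  intro a b ha hab hb
  induction b, hab using Nat.le_induction with
  | base => exact le_refl _
  | succ b hab ih => exact le_trans (ih (by omega)) (h b (by omega) (by omega))

lemma firstGE_skip (arr : List Int) (x : Int) (n j : Nat) :
    ∀ j', j ≤ j' → j' ≤ n → (∀ k, j ≤ k → k < j' → pvGet arr k < x) →
      firstGE arr x j n = firstGE arr x j' n := by
  intro j' hj
  induction j', hj using Nat.le_induction with
  | base => intro _ _; rfl
  | succ j' hj ih =>
      intro hn hall
      rw [ih (by omega) (fun k hk1 hk2 => hall k hk1 (by omega))]
      have hx : ¬ x ≤ pvGet arr j' := by have := hall j' hj (by omega); omega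
      conv_lhs => rw [firstGE]
      rw [dif_pos (by omega : j' < n), if_neg hx]

lemma firstGE_hit (arr : List Int) (x : Int) (n : Nat) :
    ∀ d lo m, m - lo ≤ d → lo ≤ m → m < n → x ≤ pvGet arr m →
      firstGE arr x lo m = firstGE arr x lo n := by
  intro d
  induction d with
  | zero =>
      intro lo m h1 h2 hmn hx
      have : lo = m := by omega
      subst this
      conv_lhs => rw [firstGE]
      conv_rhs => rw [firstGE]
      rw [dif_neg (by omega : ¬ lo < lo), dif_pos hmn, if_pos hx]
  | succ d ih =>
      intro lo m h1 h2 hmn hx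
      by_cases hlm : lo < m
      · conv_lhs => rw [firstGE]
        conv_rhs => rw [firstGE]
        rw [dif_pos hlm, dif_pos (by omega : lo < n)]
        by_cases hx0 : x ≤ pvGet arr lo
        · rw [if_pos hx0, if_pos hx0]
        · rw [if_neg hx0, if_neg hx0]
          exact ih (lo + 1) m (by omega) (by omega) hmn hx
      · have : lo = m := by omega
        subst this
        conv_lhs => rw [firstGE]
        conv_rhs => rw [firstGE]
        rw [dif_neg (by omega : ¬ lo < lo), dif_pos hmn, if_pos hx]

-- binary search equals the linear first-hit scan on a sorted range
lemma bisect_firstGE (arr : List Int) (x : Int) (lo hi : Nat) :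
    lo ≤ hi →
    (∀ a b, lo ≤ a → a ≤ b → b < hi → pvGet arr a ≤ pvGet arr b) →
    bisectLeftLoop arr x lo hi = firstGE arr x lo hi := by
  fun_induction bisectLeftLoop arr x lo hi with
  | case1 lo hi h mid hmidlt ih =>
      intro hle hsorted
      have hm : mid = (lo + hi) / 2 := rfl
      rw [ih (by omega) (fun a b ha hab hb => hsorted a b (by omega) hab hb)]
      exact (firstGE_skip arr x hi lo (mid + 1) (by omega) (by omega)
        (fun k hk1 hk2 =>
          lt_of_le_of_lt (hsorted k mid hk1 (by omega) (by omega)) hmidlt)).symm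
  | case2 lo hi h mid hmidge ih =>
      intro hle hsorted
      have hm : mid = (lo + hi) / 2 := rfl
      rw [ih (by omega) (fun a b ha hab hb => hsorted a b ha hab (by omega))]
      exact firstGE_hit arr x hi (mid - lo) lo mid (by omega) (by omega) (by omega) (by omega)
  | case3 lo hi h =>
      intro hle hsorted
      have : lo = hi := by omega
      subst this
      rw [firstGE, dif_neg (by omega : ¬ lo < lo)]

lemma foldl_min_absorb (f : Nat → Int) (l : List Nat) :
    ∀ ans : Int, (∀ k ∈ l, ans ≤ f k) →
      l.foldl (fun acc k => min acc (f k)) ans = ans := by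
  induction l with
  | nil => intro ans _; rfl
  | cons k l ih =>
      intro ans h
      simp only [List.foldl_cons]
      rw [min_eq_left (h k (by simp))]
      exact ih ans (fun k' hk' => h k' (by simp [hk']))

-- the merge loop computes the same running minimum as A's bisect loop
lemma merge_eq (arr : List Int) (n L R : Nat)
    (hpre : ∀ k, k < L → pvGet arr k ≤ pvGet arr (k + 1)) :
    ∀ m i j (ans : Int), (L + 1 - i) + (n - j) ≤ m → i ≤ L + 1 → R ≤ j → j ≤ n →
      (∀ j', R ≤ j' → j' < j → i ≤ L → pvGet arr j' < pvGet arr i) →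
      ans ≤ (n : Int) - (L : Int) - 1 →
      bMerge arr n L i j ans =
        (List.range' i (L + 1 - i)).foldl
          (fun acc k => min acc ((firstGE arr (pvGet arr k) R n : Int) - ((k : Int) + 1))) ans := by
  intro m
  induction m with
  | zero =>
      intro i j ans hm hi hRj hjn H1 Hans
      have h1 : i = L + 1 := by omega
      have h2 : j = n := by omega
      rw [bMerge, dif_neg (by omega : ¬ (i ≤ L ∧ j < n))]
      rw [show L + 1 - i = 0 by omega, List.range'_zero, List.foldl_nil]
  | succ m ih =>
      intro i j ans hm hi hRj hjn H1 Hans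
      rw [bMerge]
      by_cases hcond : i ≤ L ∧ j < n
      · rw [dif_pos hcond]
        by_cases hle : pvGet arr i ≤ pvGet arr j
        · rw [if_pos hle]
          have hfirst : firstGE arr (pvGet arr i) R n = j := by
            rw [firstGE_skip arr (pvGet arr i) n R j hRj (by omega)
              (fun k hk1 hk2 => H1 k hk1 hk2 hcond.1)]
            rw [firstGE, dif_pos hcond.2, if_pos hle]
          have H1' : ∀ j', R ≤ j' → j' < j → i + 1 ≤ L → pvGet arr j' < pvGet arr (i + 1) :=
            fun j' hj1 hj2 hi1 =>
              lt_of_lt_of_le (H1 j' hj1 hj2 hcond.1) (hpre i (by omega))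
          rw [ih (i + 1) j (min ans ((j : Int) - (i : Int) - 1)) (by omega) (by omega) hRj hjn
            H1' (le_trans (min_le_left _ _) Hans)]
          rw [show L + 1 - i = (L + 1 - (i + 1)) + 1 by omega, List.range'_succ, List.foldl_cons]
          congr 1
          rw [hfirst]
          ring_nf
        · rw [if_neg hle]
          have H1' : ∀ j', R ≤ j' → j' < j + 1 → i ≤ L → pvGet arr j' < pvGet arr i := by
            intro j' hj1 hj2 hiL
            rcases Nat.lt_or_ge j' j with hlt | hge
            · exact H1 j' hj1 hlt hiL
            · have : j' = j := by omega
              subst this; omega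
          exact ih i (j + 1) ans (by omega) hi (by omega) (by omega) H1' Hans
      · rw [dif_neg hcond]
        by_cases hiL : i ≤ L
        · have hj : j = n := by omega
          symm
          apply foldl_min_absorb
          intro k hk
          obtain ⟨t, ht, rfl⟩ := List.mem_range'.1 hk
          have hgik : pvGet arr i ≤ pvGet arr (i + 1 * t) :=
            chain_le (pvGet arr) 0 L (fun k _ hkL => hpre k hkL) i (i + 1 * t)
              (by omega) (by omega) (by omega)
          have hfk : firstGE arr (pvGet arr (i + 1 * t)) R n = n := by
            rw [firstGE_skip arr (pvGet arr (i + 1 * t)) n R n (by omega) (le_refl n)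
              (fun k' hk1 hk2 => lt_of_lt_of_le (H1 k' hk1 (by omega) hiL) hgik)]
            rw [firstGE, dif_neg (by omega : ¬ n < n)]
          rw [hfk]
          omega
        · rw [show L + 1 - i = 0 by omega, List.range'_zero, List.foldl_nil]

-- ===== VERDICT (by name: the statement is the Claim_ definition above) =====
theorem findLengthOfShortestSubarray2_spec : Claim_equal_findLengthOfShortestSubarray2 := by
  intro arr _ hne
  unfold Spec_findLengthOfShortestSubarray2
  unfold findLengthOfShortestSubarray2 findLengthOfShortestSubarray2_alt
  simp only []
  have hn1 : 1 ≤ arr.length := List.length_pos_iff.2 hne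
  obtain ⟨hL0, hLn, hpre, hstop⟩ := bLeftLoop_spec arr arr.length 0
  rw [leftLoop_eq]
  by_cases hcase : bLeftLoop arr arr.length 0 + 1 ≥ arr.length
  · have hL : bLeftLoop arr arr.length 0 = arr.length - 1 := by
      have := hLn (by omega); omega
    rw [if_pos hL, if_pos hcase]
  · have hL1 : bLeftLoop arr arr.length 0 + 1 < arr.length := by omega
    rw [if_neg (by omega : ¬ bLeftLoop arr arr.length 0 = arr.length - 1),
        if_neg (by omega : ¬ bLeftLoop arr arr.length 0 + 1 ≥ arr.length)]
    have hd : ¬ pvGet arr (bLeftLoop arr arr.length 0) ≤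
        pvGet arr (bLeftLoop arr arr.length 0 + 1) := fun h => hstop ⟨hL1, h⟩
    rw [rightLoop_eq arr _ hd (arr.length - 1) (by omega)]
    obtain ⟨hR1, hR2, hRstep⟩ := bRightLoop_spec arr _ hd (arr.length - 1) (by omega)
    have hs : ∀ a b, bRightLoop arr (arr.length - 1) ≤ a → a ≤ b → b < arr.length →
        pvGet arr a ≤ pvGet arr b := fun a b ha hab hb =>
      chain_le (pvGet arr) (bRightLoop arr (arr.length - 1)) (arr.length - 1) hRstep a b ha hab
        (by omega)
    rw [List.foldl_ext (g := fun acc i =>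
        min acc ((firstGE arr (pvGet arr i) (bRightLoop arr (arr.length - 1)) arr.length : Int) -
          ((i : Int) + 1)))
      (H := fun acc i _ => by
        rw [bisect_firstGE arr (pvGet arr i) (bRightLoop arr (arr.length - 1)) arr.length
          (by omega) hs])]
    rw [List.range_eq_range']
    have hmain := merge_eq arr arr.length (bLeftLoop arr arr.length 0)
      (bRightLoop arr (arr.length - 1)) (fun k hk => hpre k (by omega) hk)
      ((bLeftLoop arr arr.length 0 + 1 - 0) + (arr.length - bRightLoop arr (arr.length - 1)))
      0 (bRightLoop arr (arr.length - 1))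
      (min ((arr.length : Int) - (bLeftLoop arr arr.length 0 : Int) - 1)
        (bRightLoop arr (arr.length - 1) : Int))
      (le_refl _) (by omega) (le_refl _) (by omega)
      (fun j' h1 h2 _ => by omega)
      (min_le_left _ _)
    rw [hmain]
    congr 2
    ring
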